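-- pv_equiv track=rewrite | github.com/polkerty/zumbers | zumber.py | sub_zumbers_of_multiset2
-- ===== SOURCE A (Python) =====
-- Zumber = tuple[int, ...]
--
-- subset_cache: dict[Zumber, list[Zumber]] = dict()
--
-- def sub_zumbers_of_multiset2(multiset: Zumber):
--     if multiset in subset_cache:
--         return subset_cache[multiset]
--     ret = []
--     for i in range(1, 2 ** len(multiset)):
--         item = []
--         tot = 0
--         for j in range(len(multiset)):
--             if i & (1 << j):
--                 item.append(multiset[j])
--                 tot += multiset[j]
--         if tot == 0:
--             ret.append(tuple(item))
--
--     subset_cache[multiset] = ret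
--     return ret
-- ===== SOURCE B (Python) =====
-- def sub_zumbers_of_multiset2(multiset):
--     # Power-set doubling: after processing a prefix, subs holds (subset, sum) for
--     # every subset of that prefix, in bitmask counting order.  No inner bit loop.
--     subs = [((), 0)]
--     for x in multiset:
--         subs = subs + [(s + (x,), t + x) for (s, t) in subs]
--     return [s for (s, t) in subs[1:] if t == 0]
-- ===== Notes on version B (the rewrite author's own statement) =====
-- stated objective: alternative
-- what changed: Replaces the bitmask enumeration with its O(2^n * n) inner bit-testing loop by a power-set doubling fold that carries (subset, running sum) pairs and extends them element by element, then filters the zero-sum ones; subset order (bitmask counting order) and element order are preserved.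
import Mathlib
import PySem

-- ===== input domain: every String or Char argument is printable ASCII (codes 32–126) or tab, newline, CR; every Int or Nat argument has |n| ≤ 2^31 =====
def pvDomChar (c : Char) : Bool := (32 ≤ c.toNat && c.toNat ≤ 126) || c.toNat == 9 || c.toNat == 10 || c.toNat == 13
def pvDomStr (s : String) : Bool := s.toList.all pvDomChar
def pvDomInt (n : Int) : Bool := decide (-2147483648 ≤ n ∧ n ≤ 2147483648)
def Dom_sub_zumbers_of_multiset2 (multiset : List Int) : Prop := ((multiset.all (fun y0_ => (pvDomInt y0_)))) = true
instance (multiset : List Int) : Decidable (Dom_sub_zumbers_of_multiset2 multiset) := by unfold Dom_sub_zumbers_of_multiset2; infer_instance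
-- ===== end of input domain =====

-- B replaces A's bitmask enumeration (inner bit-testing loop per mask) by a power-set
-- doubling fold carrying (subset, sum) pairs; A's module-level cache (a side effect that
-- never changes the returned value) is not reproduced — the claim is about the return value.


-- ===== PORT A =====
-- literal port of A (without the cache); j ≥ 0 on every iteration, so 'j.toNat' in
-- '1 <<< j.toNat' is exactly Python's '1 << j'
def sub_zumbers_of_multiset2 (multiset : List Int) : List (List Int) :=
  (PySem.List.pyRange 1 (2 ^ multiset.length) 1).foldl (fun ret i =>
    let p := (PySem.List.pyRange 0 (multiset.length) 1).foldl
      (fun (p : List Int × Int) j =>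
        if PySem.Int.band i (1 <<< j.toNat) ≠ 0 then
          (p.1 ++ [PySem.List.pyGetD multiset j 0], p.2 + PySem.List.pyGetD multiset j 0)
        else p) ([], 0)
    if p.2 = 0 then ret ++ [p.1] else ret) []

-- ===== PORT B =====
def sub_zumbers_of_multiset2_alt (multiset : List Int) : List (List Int) :=
  let subs := multiset.foldl
    (fun subs x => subs ++ subs.map (fun st => (st.1 ++ [x], st.2 + x)))
    [(([] : List Int), (0 : Int))]
  (subs.drop 1).filterMap (fun st => if st.2 = 0 then some st.1 else none)

-- ===== PRECONDITION & SPEC =====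
def Spec_sub_zumbers_of_multiset2 (multiset : List Int) (out : List (List Int)) : Prop := out = sub_zumbers_of_multiset2_alt multiset
instance (multiset : List Int) (out : List (List Int)) : Decidable (Spec_sub_zumbers_of_multiset2 multiset out) := by unfold Spec_sub_zumbers_of_multiset2; infer_instance

-- ===== CLAIM (what is proved, stated in full; the proofs are below) =====
def Claim_equal_sub_zumbers_of_multiset2 : Prop := ∀ (multiset : List Int), Dom_sub_zumbers_of_multiset2 multiset → Spec_sub_zumbers_of_multiset2 multiset (sub_zumbers_of_multiset2 multiset)

-- ===== LEMMAS AND PROOFS =====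

-- the (subset, sum) pair selected by mask k from ms
def pvPT (ms : List Int) (k : Nat) : List Int × Int :=
  (List.range ms.length).foldl
    (fun p j => if k.testBit j then (p.1 ++ [ms.getD j 0], p.2 + ms.getD j 0) else p)
    ([], 0)

-- all subsets in mask counting order
def pvSubs (ms : List Int) : List (List Int × Int) :=
  (List.range (2 ^ ms.length)).map (pvPT ms)

theorem pvFoldlCongr {α β : Type} (l : List α) (f g : β → α → β) (i : β)
    (h : ∀ a ∈ l, ∀ p, f p a = g p a) : l.foldl f i = l.foldl g i := by
  induction l generalizing i with
  | nil => rfl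
  | cons x xs ih =>
      rw [List.foldl_cons, List.foldl_cons, h x (List.mem_cons_self ..)]
      exact ih (g i x) (fun a ha p => h a (List.mem_cons_of_mem _ ha) p)

theorem pvFoldAppendIf {α : Type} (l : List α) (g : α → List Int × Int)
    (acc : List (List Int)) :
    l.foldl (fun acc x => if (g x).2 = 0 then acc ++ [(g x).1] else acc) acc
      = acc ++ (l.map g).filterMap (fun st => if st.2 = 0 then some st.1 else none) := by
  induction l generalizing acc with
  | nil => simp
  | cons x xs ih =>
      simp only [List.foldl_cons, List.map_cons, List.filterMap_cons]
      by_cases h : (g x).2 = 0 <;> simp [h, ih]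

theorem pvInner (ms : List Int) (k : Nat) :
    (PySem.List.pyRange 0 (ms.length) 1).foldl
      (fun (p : List Int × Int) j =>
        if PySem.Int.band (k : Int) (1 <<< j.toNat) ≠ 0 then
          (p.1 ++ [PySem.List.pyGetD ms j 0], p.2 + PySem.List.pyGetD ms j 0)
        else p) ([], 0) = pvPT ms k := by
  rw [PySem.List.pyRange_zero_nat, List.foldl_map, pvPT]
  apply pvFoldlCongr
  intro j _ p
  rw [show ((j : Int)).toNat = j from Int.toNat_natCast j]
  have hsh : ((1 : Int) <<< j) = ((1 <<< j : Nat) : Int) := by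
    rw [Int.shiftLeft_eq, Nat.shiftLeft_eq]; push_cast; ring
  have h3 : (PySem.Int.band (k : Int) ((1 : Int) <<< j) ≠ 0) ↔ k.testBit j := by
    rw [hsh, PySem.Int.band_natCast]
    cases hb : k.testBit j <;>
      simp [Nat.shiftLeft_eq, Nat.and_two_pow, hb]
  by_cases hb : k.testBit j <;>
    simp [h3, hb, PySem.List.pyGetD_natCast]

-- pvPT on a snoc, low masks
theorem pvPT_snoc_lo (ms : List Int) (x : Int) (k : Nat) (hk : k < 2 ^ ms.length) :
    pvPT (ms ++ [x]) k = pvPT ms k := by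
  unfold pvPT
  rw [List.length_append, List.length_singleton, List.range_succ, List.foldl_append]
  have hbit : k.testBit ms.length = false := Nat.testBit_lt_two_pow hk
  have hpre : (List.range ms.length).foldl
        (fun p j => if k.testBit j then (p.1 ++ [(ms ++ [x]).getD j 0], p.2 + (ms ++ [x]).getD j 0) else p) (([] : List Int), (0 : Int))
      = (List.range ms.length).foldl
        (fun p j => if k.testBit j then (p.1 ++ [ms.getD j 0], p.2 + ms.getD j 0) else p) ([], 0) := by
    apply pvFoldlCongr
    intro j hj p
    rw [List.getD_append ms [x] 0 j (List.mem_range.mp hj)]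
  rw [hpre]
  simp [hbit]

-- pvPT on a snoc, high masks
theorem pvPT_snoc_hi (ms : List Int) (x : Int) (k : Nat) (hk : k < 2 ^ ms.length) :
    pvPT (ms ++ [x]) (2 ^ ms.length + k)
      = ((pvPT ms k).1 ++ [x], (pvPT ms k).2 + x) := by
  unfold pvPT
  rw [List.length_append, List.length_singleton, List.range_succ, List.foldl_append]
  have hbit : (2 ^ ms.length + k).testBit ms.length = true := by
    rw [Nat.testBit_two_pow_add_eq, Nat.testBit_lt_two_pow hk]; rfl
  have hpre : (List.range ms.length).foldl
        (fun p j => if (2 ^ ms.length + k).testBit j then (p.1 ++ [(ms ++ [x]).getD j 0], p.2 + (ms ++ [x]).getD j 0) else p) (([] : List Int), (0 : Int))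
      = (List.range ms.length).foldl
        (fun p j => if k.testBit j then (p.1 ++ [ms.getD j 0], p.2 + ms.getD j 0) else p) ([], 0) := by
    apply pvFoldlCongr
    intro j hj p
    have hj' := List.mem_range.mp hj
    rw [Nat.testBit_two_pow_add_gt hj', List.getD_append ms [x] 0 j hj']
  rw [hpre]
  simp [hbit]

theorem pvSubs_snoc (ms : List Int) (x : Int) :
    pvSubs (ms ++ [x]) = pvSubs ms ++ (pvSubs ms).map (fun st => (st.1 ++ [x], st.2 + x)) := by
  unfold pvSubs
  rw [List.length_append, List.length_singleton, pow_succ,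
      show 2 ^ ms.length * 2 = 2 ^ ms.length + 2 ^ ms.length by ring,
      List.range_add, List.map_append]
  congr 1
  · apply List.map_congr_left
    intro k hk
    exact pvPT_snoc_lo ms x k (List.mem_range.mp hk)
  · rw [List.map_map, List.map_map]
    apply List.map_congr_left
    intro k hk
    exact pvPT_snoc_hi ms x k (List.mem_range.mp hk)

theorem pvB_subs (ms : List Int) :
    ms.foldl (fun subs x => subs ++ subs.map (fun st => (st.1 ++ [x], st.2 + x)))
      [(([] : List Int), (0 : Int))] = pvSubs ms := by
  induction ms using List.reverseRecOn with
  | nil => simp [pvSubs, pvPT]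
  | append_singleton ms x ih =>
      rw [List.foldl_append, List.foldl_cons, List.foldl_nil, ih, pvSubs_snoc]

theorem pvA_eq (ms : List Int) :
    sub_zumbers_of_multiset2 ms
      = ((pvSubs ms).drop 1).filterMap (fun st => if st.2 = 0 then some st.1 else none) := by
  unfold sub_zumbers_of_multiset2
  simp only []
  rw [pvFoldAppendIf (PySem.List.pyRange 1 (2 ^ ms.length) 1)
      (fun i => (PySem.List.pyRange 0 (ms.length) 1).foldl
        (fun (p : List Int × Int) j =>
          if PySem.Int.band i (1 <<< j.toNat) ≠ 0 then
            (p.1 ++ [PySem.List.pyGetD ms j 0], p.2 + PySem.List.pyGetD ms j 0)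
          else p) ([], 0)) []]
  rw [List.nil_append]
  congr 1
  have hcast : ((2 : Int) ^ ms.length) = ((2 ^ ms.length : Nat) : Int) := by push_cast; ring
  have hzn : PySem.List.pyRange 0 ((2 ^ ms.length : Nat) : Int) 1
      = (List.range (2 ^ ms.length)).map (fun k : Nat => (k : Int)) :=
    PySem.List.pyRange_zero_nat _
  have hsplit : PySem.List.pyRange 0 ((2 ^ ms.length : Nat) : Int) 1
      = PySem.List.pyRange 0 1 1 ++ PySem.List.pyRange 1 ((2 ^ ms.length : Nat) : Int) 1 :=
    PySem.List.pyRange_one_append 0 1 _ (by omega)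
      (by exact_mod_cast Nat.one_le_two_pow)
  have h0 : PySem.List.pyRange 0 (1 : Int) 1 = [0] := by decide
  have key : PySem.List.pyRange 1 ((2 ^ ms.length : Nat) : Int) 1
      = ((List.range (2 ^ ms.length)).map (fun k : Nat => (k : Int))).drop 1 := by
    rw [← hzn, hsplit, h0]
    rfl
  rw [hcast, key, ← List.map_drop, List.map_map, pvSubs, ← List.map_drop]
  apply List.map_congr_left
  intro k _
  exact pvInner ms k

-- ===== VERDICT (by name: the statement is the Claim_ definition above) =====
theorem sub_zumbers_of_multiset2_spec : Claim_equal_sub_zumbers_of_multiset2 := by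
  intro ms _
  unfold Spec_sub_zumbers_of_multiset2 sub_zumbers_of_multiset2_alt
  rw [pvA_eq, pvB_subs]
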